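-- pv_equiv track=rewrite | github.com/SCELabs/aegis-code | aegis_code/patches/diff_repair.py | _replace_unique_removed_chunk
-- ===== SOURCE A (Python) =====
-- def _replace_unique_removed_chunk(
--     current: str,
--     removed_lines: list[str],
--     added_lines: list[str],
-- ) -> tuple[str | None, str | None]:
--     if not removed_lines:
--         return None, "missing_removed_lines"
--     source_lines = current.splitlines()
--     chunk_len = len(removed_lines)
--     if chunk_len <= 0:
--         return None, "missing_removed_lines"
--     matches: list[int] = []
--     for i in range(0, len(source_lines) - chunk_len + 1):
--         if source_lines[i : i + chunk_len] == removed_lines: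
--             matches.append(i)
--     if not matches:
--         return None, "removed_lines_not_found"
--     if len(matches) > 1:
--         return None, "ambiguous_removed_lines_match"
--     start = matches[0]
--     replaced = source_lines[:start] + added_lines + source_lines[start + chunk_len :]
--     updated = "\n".join(replaced)
--     if current.endswith("\n"):
--         updated += "\n"
--     return updated, None
-- ===== SOURCE B (Python) =====
-- def _replace_unique_removed_chunk(
--     current: str,
--     removed_lines: list[str],
--     added_lines: list[str],
-- ) -> tuple[str | None, str | None]:
--     if not removed_lines:
--         return None, "missing_removed_lines"
--     src = current.splitlines()
--     # inverted index: line text -> ascending list of the positions where it occurs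
--     index: dict[str, list[int]] = {}
--     for i, line in enumerate(src):
--         index.setdefault(line, []).append(i)
--     m = len(removed_lines)
--     cand = index.get(removed_lines[0], [])
--     occ = [set(index.get(r, [])) for r in removed_lines]
--     # a chunk match is a positional intersection of the posting lists:
--     # start i works iff every removed_lines[j] occurs at position i + j
--     matches = [
--         i
--         for i in cand
--         if i + m <= len(src) and all(i + j in occ[j] for j in range(1, m))
--     ]
--     if not matches:
--         return None, "removed_lines_not_found"
--     if len(matches) > 1:
--         return None, "ambiguous_removed_lines_match"
--     start = matches[0]
--     body = src[:start] + added_lines + src[start + m :]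
--     updated = "\n".join(body)
--     if current.endswith("\n"):
--         updated += "\n"
--     return updated, None
-- ===== Notes on version B (the rewrite author's own statement) =====
-- stated objective: alternative
-- what changed: Replaces A's scan of every start offset with a slice comparison at each by an inverted index (one pass building line -> positions) whose posting list for the first removed line supplies the only candidate offsets, a match being decided by membership of i+j in the precomputed position sets of the other removed lines.
import Mathlib
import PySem

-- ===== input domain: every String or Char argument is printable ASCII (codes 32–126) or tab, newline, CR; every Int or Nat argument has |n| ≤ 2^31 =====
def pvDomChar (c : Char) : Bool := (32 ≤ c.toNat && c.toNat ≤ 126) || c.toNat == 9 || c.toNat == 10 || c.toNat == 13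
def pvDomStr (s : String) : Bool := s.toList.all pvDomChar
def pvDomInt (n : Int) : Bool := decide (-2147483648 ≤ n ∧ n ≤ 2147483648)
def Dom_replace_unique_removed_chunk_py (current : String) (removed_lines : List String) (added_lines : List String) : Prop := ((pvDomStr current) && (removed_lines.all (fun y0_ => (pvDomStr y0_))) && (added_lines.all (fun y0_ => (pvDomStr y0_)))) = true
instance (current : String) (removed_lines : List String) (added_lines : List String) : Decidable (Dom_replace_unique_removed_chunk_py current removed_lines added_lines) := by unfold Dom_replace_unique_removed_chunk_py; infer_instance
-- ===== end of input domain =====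

-- B replaces A's scan over every start position (slice comparison at each) by an inverted
-- index line → positions built in one pass; only the positions of the first removed line are
-- candidates and a match is decided by membership in the precomputed posting sets.

-- ===== PORT A =====
def replace_unique_removed_chunk_py (current : String) (removed_lines : List String) (added_lines : List String) : Option String × Option String :=
  if removed_lines = [] then (none, some "missing_removed_lines")
  else
    let source_lines := PySem.Str.splitlines current
    let chunk_len : Int := removed_lines.length
    if chunk_len ≤ 0 then (none, some "missing_removed_lines")
    else
      let matchList : List Int :=
        (PySem.List.pyRange 0 ((source_lines.length : Int) - chunk_len + 1) 1).foldl
          (fun acc i =>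
            if PySem.List.slice source_lines (some i) (some (i + chunk_len)) = removed_lines
            then acc ++ [i] else acc) []
      if matchList = [] then (none, some "removed_lines_not_found")
      else if 1 < matchList.length then (none, some "ambiguous_removed_lines_match")
      else
        let start := matchList.headD 0   -- matches[0]; the branch above guarantees matches ≠ []
        let replaced := PySem.List.slice source_lines none (some start) ++ added_lines ++
                        PySem.List.slice source_lines (some (start + chunk_len)) none
        let updated := PySem.Str.join "\n" replaced
        (some (if PySem.Str.endswith current "\n" then updated ++ "\n" else updated), none)

-- ===== PORT B =====
def replace_unique_removed_chunk_py_alt (current : String) (removed_lines : List String) (added_lines : List String) : Option String × Option String :=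
  match removed_lines with
  | [] => (none, some "missing_removed_lines")
  | r0 :: rest =>
    let src := PySem.Str.splitlines current
    -- index.setdefault(line, []).append(i) over enumerate(src)
    let index : PySem.Dict String (List Int) :=
      (PySem.List.enumerate src).foldl (fun d p => d.modify p.2 [] (· ++ [p.1])) PySem.Dict.empty
    let m : Int := (r0 :: rest).length
    let cand := index.getD r0 []
    let occ : List (PySem.Set Int) := (r0 :: rest).map (fun r => PySem.Set.ofList (index.getD r []))
    -- occ[j] is looked up with j drawn from range(1, m), always in range
    let matchList := cand.filter (fun i =>
      decide (i + m ≤ (src.length : Int)) &&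
      (PySem.List.pyRange 1 m 1).all (fun j =>
        PySem.Set.contains (PySem.List.pyGetD occ j PySem.Set.empty) (i + j)))
    if matchList = [] then (none, some "removed_lines_not_found")
    else if 1 < matchList.length then (none, some "ambiguous_removed_lines_match")
    else
      let start := matchList.headD 0   -- matches[0]; the branch above guarantees matches ≠ []
      let body := PySem.List.slice src none (some start) ++ added_lines ++
                  PySem.List.slice src (some (start + m)) none
      let updated := PySem.Str.join "\n" body
      (some (if PySem.Str.endswith current "\n" then updated ++ "\n" else updated), none)

-- ===== PRECONDITION & SPEC =====
def Spec_replace_unique_removed_chunk_py (current : String) (removed_lines : List String) (added_lines : List String) (out : Option String × Option String) : Prop := out = replace_unique_removed_chunk_py_alt current removed_lines added_lines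
instance (current : String) (removed_lines : List String) (added_lines : List String) (out : Option String × Option String) : Decidable (Spec_replace_unique_removed_chunk_py current removed_lines added_lines out) := by unfold Spec_replace_unique_removed_chunk_py; infer_instance

-- ===== CLAIM (what is proved, stated in full; the proofs are below) =====
def Claim_equal_replace_unique_removed_chunk_py : Prop := ∀ (current : String) (removed_lines : List String) (added_lines : List String), Dom_replace_unique_removed_chunk_py current removed_lines added_lines → Spec_replace_unique_removed_chunk_py current removed_lines added_lines (replace_unique_removed_chunk_py current removed_lines added_lines)

-- ===== LEMMAS AND PROOFS =====

-- the slice comparison at position i, as a structural predicate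
def pvMatchAt (src : List String) (i : Nat) : List String → Bool
  | [] => true
  | r :: rest =>
    match src[i]? with
    | none => false
    | some s => if s = r then pvMatchAt src (i + 1) rest else false

theorem pvMatchAt_eq (src : List String) (removed : List String) : ∀ i : Nat,
    pvMatchAt src i removed = decide ((src.drop i).take removed.length = removed) := by
  induction removed with
  | nil => intro i; simp [pvMatchAt]
  | cons r rest ih =>
    intro i
    cases h : src[i]? with
    | none =>
      have hd : src.drop i = [] := by
        have := List.getElem?_eq_none_iff.mp h
        simp [List.drop_eq_nil_iff]; omega
      simp [pvMatchAt, h, hd]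
    | some s =>
      have hi : i < src.length := by
        by_contra hc
        rw [List.getElem?_eq_none_iff.mpr (by omega)] at h; simp at h
      have hd : src.drop i = s :: src.drop (i + 1) := by
        rw [List.drop_eq_getElem_cons hi]
        have hv : src[i] = s := by
          obtain ⟨_, hv⟩ := List.getElem?_eq_some_iff.mp h; exact hv
        rw [hv]
      rw [pvMatchAt, h, hd]
      by_cases hs : s = r
      · simp [hs, ih (i + 1)]
      · simp [hs]

theorem pvMatchAt_false_of_short (src removed : List String) (i : Nat)
    (hne : removed ≠ []) (h : src.length < i + removed.length) :
    pvMatchAt src i removed = false := by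
  rw [pvMatchAt_eq]
  apply decide_eq_false
  intro hc
  have hlen := congrArg List.length hc
  simp [List.length_take, List.length_drop] at hlen
  have hr0 : removed.length ≠ 0 := by
    intro h0; exact hne (List.eq_nil_of_length_eq_zero h0)
  omega

-- pointwise characterisation of a match
theorem pvMatchAt_iff (src : List String) (removed : List String) : ∀ i : Nat,
    pvMatchAt src i removed = true ↔
      ∀ j < removed.length, i + j < src.length ∧ src.getD (i + j) "" = removed.getD j "" := by
  induction removed with
  | nil => intro i; simp [pvMatchAt]
  | cons r rest ih =>
    intro i
    cases hg : src[i]? with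
    | none =>
      have hi : src.length ≤ i := by
        by_contra hc
        rw [List.getElem?_eq_getElem (by omega)] at hg; simp at hg
      rw [show pvMatchAt src i (r :: rest) = false from by simp [pvMatchAt, hg]]
      simp only [Bool.false_eq_true, false_iff]
      intro hall
      have h0 := (hall 0 (by simp)).1
      omega
    | some s =>
      have hi : i < src.length := by
        by_contra hc
        rw [List.getElem?_eq_none_iff.mpr (by omega)] at hg; simp at hg
      have hs : src[i] = s := (List.getElem?_eq_some_iff.mp hg).2
      simp only [pvMatchAt, hg]
      by_cases hsr : s = r
      · rw [if_pos hsr, ih (i + 1)]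
        constructor
        · intro hR j hj
          cases j with
          | zero =>
            refine ⟨by omega, ?_⟩
            rw [Nat.add_zero, List.getD_eq_getElem?_getD, List.getElem?_eq_getElem hi]
            simp [hs, hsr]
          | succ t =>
            obtain ⟨h1, h2⟩ := hR t (by simpa using hj)
            refine ⟨by omega, ?_⟩
            rw [show i + (t + 1) = i + 1 + t from by omega]
            simpa using h2
        · intro hL t ht
          obtain ⟨h1, h2⟩ := hL (t + 1) (by simpa using Nat.succ_lt_succ ht)
          refine ⟨by omega, ?_⟩
          rw [show i + 1 + t = i + (t + 1) from by omega]
          simpa using h2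
      · rw [if_neg hsr]
        simp only [Bool.false_eq_true, false_iff]
        intro hall
        have h0 := (hall 0 (by simp)).2
        rw [Nat.add_zero, List.getD_eq_getElem?_getD, List.getElem?_eq_getElem hi] at h0
        simp [hs] at h0
        exact hsr h0

-- A's matches list is the filtered list of matching positions, cast to Int
theorem matches_eq (src removed : List String) (hne : removed ≠ []) :
    (PySem.List.pyRange 0 ((src.length : Int) - (removed.length : Int) + 1) 1).foldl
      (fun acc i =>
        if PySem.List.slice src (some i) (some (i + (removed.length : Int))) = removed
        then acc ++ [i] else acc) [] =
    ((List.range src.length).filter (fun j => pvMatchAt src j removed)).map (fun j : Nat => (j : Int)) := by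
  have hk : 1 ≤ removed.length := by
    cases removed with
    | nil => exact absurd rfl hne
    | cons a l => simp
  rw [PySem.List.foldl_append_ite_eq_filter, List.nil_append, PySem.List.pyRange_one]
  rw [List.filter_map]
  have hstep : ∀ j : Nat,
      (decide (PySem.List.slice src (some ((0 : Int) + (j : Int)))
        (some (((0 : Int) + (j : Int)) + (removed.length : Int))) = removed))
      = pvMatchAt src j removed := by
    intro j
    rw [zero_add, PySem.List.slice_natCast_add, pvMatchAt_eq]
  have hm_le : (((src.length : Int) - (removed.length : Int) + 1) - 0).toNat ≤ src.length := by
    omega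
  have hrange : List.range src.length =
      List.range ((((src.length : Int) - (removed.length : Int) + 1) - 0).toNat) ++
      (List.range (src.length - (((src.length : Int) - (removed.length : Int) + 1) - 0).toNat)).map
        ((((src.length : Int) - (removed.length : Int) + 1) - 0).toNat + ·) := by
    rw [← List.range_add, Nat.add_sub_cancel' hm_le]
  rw [hrange, List.filter_append]
  have hzero : (((List.range (src.length - (((src.length : Int) - (removed.length : Int) + 1) - 0).toNat)).map
        ((((src.length : Int) - (removed.length : Int) + 1) - 0).toNat + ·)).filter
        (fun j => pvMatchAt src j removed)) = [] := by
    rw [List.filter_eq_nil_iff]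
    intro j hj
    simp only [List.mem_map, List.mem_range] at hj
    obtain ⟨t, _, ht⟩ := hj
    have hjt : (((src.length : Int) - (removed.length : Int) + 1) - 0).toNat ≤ j := by omega
    have hshort : src.length < j + removed.length := by omega
    simp [pvMatchAt_false_of_short src removed j hne hshort]
  rw [hzero, List.append_nil]
  have hfilt : List.filter
      ((fun i : Int => decide (PySem.List.slice src (some i) (some (i + (removed.length : Int))) = removed)) ∘
        (fun k : Nat => (0 : Int) + (k : Int)))
      (List.range ((((src.length : Int) - (removed.length : Int) + 1) - 0).toNat)) =
      List.filter (fun j => pvMatchAt src j removed)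
      (List.range ((((src.length : Int) - (removed.length : Int) + 1) - 0).toNat)) := by
    apply List.filter_congr
    intro j _
    simp only [Function.comp]
    exact hstep j
  rw [hfilt]
  simp

-- B's inverted index and its characterisation
def pvIdx (src : List String) : PySem.Dict String (List Int) :=
  (PySem.List.enumerate src).foldl (fun d p => d.modify p.2 [] (· ++ [p.1])) PySem.Dict.empty

theorem index_getD (src : List String) (r : String) :
    (pvIdx src).getD r [] =
    ((List.range src.length).filter (fun k => src.getD k "" == r)).map (fun k : Nat => (k : Int)) := by
  have h1 : pvIdx src =
      ((PySem.List.enumerate src).map (fun p => (p.2, p.1))).foldl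
        (fun d q => d.modify q.1 [] (· ++ [q.2])) PySem.Dict.empty := by
    unfold pvIdx; rw [List.foldl_map]
  rw [h1, PySem.Dict.getD_foldl_modify_append, PySem.List.enumerate_eq_map_pyRange src "",
      PySem.List.pyRange_one]
  simp only [List.map_map, List.filter_map, List.map_map, PySem.Dict.getD_empty, List.nil_append,
    Function.comp_def, zero_add, PySem.List.pyGetD_natCast, PySem.List.len]
  simp

theorem mem_index_getD (src : List String) (r : String) (x : Int) :
    x ∈ (pvIdx src).getD r [] ↔ ∃ k : Nat, k < src.length ∧ src.getD k "" = r ∧ x = (k : Int) := by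
  rw [index_getD]
  simp only [List.mem_map, List.mem_filter, List.mem_range, beq_iff_eq]
  constructor
  · rintro ⟨k, ⟨hk, hr⟩, rfl⟩; exact ⟨k, hk, hr, rfl⟩
  · rintro ⟨k, hk, hr, rfl⟩; exact ⟨k, ⟨hk, hr⟩, rfl⟩

theorem inner_iff (src : List String) (r0 : String) (rest : List String) (k t : Nat)
    (ht : t < rest.length) :
    (PySem.Set.contains
      (PySem.List.pyGetD ((r0 :: rest).map (fun r => PySem.Set.ofList ((pvIdx src).getD r [])))
        (1 + (t : Int)) PySem.Set.empty)
      ((k : Int) + (1 + (t : Int))) = true)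
    ↔ (k + 1 + t < src.length ∧ src.getD (k + 1 + t) "" = rest.getD t "") := by
  have hcast : (1 : Int) + (t : Int) = ((t + 1 : Nat) : Int) := by push_cast; ring
  rw [hcast, PySem.List.pyGetD_natCast]
  have hocc : ((r0 :: rest).map (fun r => PySem.Set.ofList ((pvIdx src).getD r []))).getD (t + 1)
      PySem.Set.empty = PySem.Set.ofList ((pvIdx src).getD (rest.getD t "") []) := by
    rw [List.getD_eq_getElem?_getD, List.getElem?_map]
    rw [List.getElem?_cons_succ, List.getElem?_eq_getElem ht]
    simp [List.getD_eq_getElem?_getD, List.getElem?_eq_getElem ht]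
  rw [hocc]
  rw [show (PySem.Set.contains (PySem.Set.ofList ((pvIdx src).getD (rest.getD t "") []))
        ((k : Int) + ((t + 1 : Nat) : Int)) = true)
      ↔ ((k : Int) + ((t + 1 : Nat) : Int)) ∈ (pvIdx src).getD (rest.getD t "") [] from by
    simp [PySem.Set.contains, PySem.Set.mem_ofList, ]]
  rw [mem_index_getD]
  constructor
  · rintro ⟨k', hk', hr', he⟩
    have hke : k' = k + 1 + t := by omega
    subst hke
    exact ⟨by omega, hr'⟩
  · intro ⟨h1, h2⟩
    exact ⟨k + 1 + t, h1, h2, by push_cast; ring⟩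

theorem point_eq (src : List String) (r0 : String) (rest : List String) (k : Nat)
    (hk : k < src.length) :
    ((decide ((k : Int) + ((r0 :: rest).length : Int) ≤ (src.length : Int)) &&
      (PySem.List.pyRange 1 ((r0 :: rest).length : Int) 1).all (fun j =>
        PySem.Set.contains
          (PySem.List.pyGetD ((r0 :: rest).map (fun r => PySem.Set.ofList ((pvIdx src).getD r [])))
            j PySem.Set.empty)
          ((k : Int) + j)))
      && (src.getD k "" == r0)) = pvMatchAt src k (r0 :: rest) := by
  have hrange : PySem.List.pyRange 1 ((r0 :: rest).length : Int) 1 =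
      (List.range rest.length).map (fun t : Nat => 1 + (t : Int)) := by
    rw [PySem.List.pyRange_one]
    norm_num
  rw [Bool.eq_iff_iff, pvMatchAt_iff, hrange]
  simp only [Bool.and_eq_true, decide_eq_true_eq, List.all_eq_true, beq_iff_eq,
    List.forall_mem_map, List.mem_range]
  constructor
  · rintro ⟨⟨hle, hall⟩, hr0⟩ j hj
    cases j with
    | zero =>
      exact ⟨by omega, by simpa using hr0⟩
    | succ t =>
      have ht : t < rest.length := by simpa using hj
      have := (inner_iff src r0 rest k t ht).mp (hall t ht)
      refine ⟨by omega, ?_⟩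
      rw [show k + (t + 1) = k + 1 + t from by omega]
      simpa using this.2
  · intro hall
    have h0 := hall 0 (by simp)
    have hlast := hall rest.length (by simp)
    refine ⟨⟨?_, ?_⟩, by simpa using h0.2⟩
    · have := hlast.1
      simp only [List.length_cons]
      push_cast
      omega
    · intro t ht
      apply (inner_iff src r0 rest k t ht).mpr
      have := hall (t + 1) (by simpa using Nat.succ_lt_succ ht)
      refine ⟨by omega, ?_⟩
      rw [show k + 1 + t = k + (t + 1) from by omega]
      simpa using this.2

theorem matches_alt_eq (src : List String) (r0 : String) (rest : List String) :
    ((pvIdx src).getD r0 []).filter (fun i =>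
      decide (i + ((r0 :: rest).length : Int) ≤ (src.length : Int)) &&
      (PySem.List.pyRange 1 ((r0 :: rest).length : Int) 1).all (fun j =>
        PySem.Set.contains
          (PySem.List.pyGetD ((r0 :: rest).map (fun r => PySem.Set.ofList ((pvIdx src).getD r [])))
            j PySem.Set.empty)
          (i + j))) =
    ((List.range src.length).filter (fun j => pvMatchAt src j (r0 :: rest))).map (fun j : Nat => (j : Int)) := by
  rw [index_getD src r0, List.filter_map, List.filter_filter]
  apply congrArg
  apply List.filter_congr
  intro k hk
  rw [List.mem_range] at hk
  rw [← point_eq src r0 rest k hk]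
  rfl

-- ===== VERDICT (by name: the statement is the Claim_ definition above) =====
theorem replace_unique_removed_chunk_py_spec : Claim_equal_replace_unique_removed_chunk_py := by
  intro current removed added _
  unfold Spec_replace_unique_removed_chunk_py
  cases removed with
  | nil => simp [replace_unique_removed_chunk_py, replace_unique_removed_chunk_py_alt]
  | cons r0 rest =>
    have h0 : (r0 :: rest : List String) ≠ [] := by simp
    have hkneg : ¬ (((r0 :: rest : List String).length : Int) ≤ 0) := by
      simp
    simp only [replace_unique_removed_chunk_py, replace_unique_removed_chunk_py_alt,
      if_neg h0, if_neg hkneg]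
    have hfold : (PySem.List.enumerate (PySem.Str.splitlines current)).foldl
        (fun d p => d.modify p.2 [] (· ++ [p.1])) PySem.Dict.empty =
        pvIdx (PySem.Str.splitlines current) := rfl
    rw [matches_eq (PySem.Str.splitlines current) (r0 :: rest) h0, hfold,
        matches_alt_eq (PySem.Str.splitlines current) r0 rest]
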